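-- pv_equiv track=rewrite | github.com/MrBrantCode/unitest_baseline | mut_generate/mist_train_cf/cf_86850/solution.py | group_primes
-- ===== SOURCE A (Python) =====
-- def is_prime(n):
--     if n <= 1:
--         return False
--     for i in range(2, int(n**0.5) + 1):
--         if n % i == 0:
--             return False
--     return True
--
-- def group_primes(numbers):
--     primes_dict = {}
--     for num in numbers:
--         if is_prime(abs(num)):
--             if num in primes_dict:
--                 primes_dict[num].append(num)
--             else:
--                 primes_dict[num] = [num]
--     return primes_dict
-- ===== SOURCE B (Python) =====
-- def is_prime(n):
--     if n <= 1:
--         return False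
--     for i in range(2, int(n**0.5) + 1):
--         if n % i == 0:
--             return False
--     return True
--
-- def group_primes(numbers):
--     primes = [n for n in numbers if is_prime(abs(n))]
--     counts = {}
--     for p in primes:
--         counts[p] = counts.get(p, 0) + 1
--     return {k: [k] * c for k, c in counts.items()}
-- ===== Notes on version B (the rewrite author's own statement) =====
-- stated objective: alternative
-- what changed: A grows a dict of per-key lists by appending each prime as it is seen; B filters the primes into a flat list, counts occurrences per key in a plain int dict, and builds each group afterwards as the key replicated count times.
import Mathlib
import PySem

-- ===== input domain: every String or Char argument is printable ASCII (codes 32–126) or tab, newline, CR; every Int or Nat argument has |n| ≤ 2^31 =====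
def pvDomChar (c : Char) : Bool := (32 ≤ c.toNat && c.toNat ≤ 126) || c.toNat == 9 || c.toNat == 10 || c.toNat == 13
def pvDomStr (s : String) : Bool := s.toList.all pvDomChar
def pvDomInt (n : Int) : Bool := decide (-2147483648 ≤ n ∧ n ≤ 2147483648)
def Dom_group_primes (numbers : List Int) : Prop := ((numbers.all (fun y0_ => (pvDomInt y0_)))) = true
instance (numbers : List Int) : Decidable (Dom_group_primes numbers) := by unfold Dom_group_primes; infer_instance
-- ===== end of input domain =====

-- B replaces A's incremental dict-of-growing-lists with a filter / count / replicate decomposition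
-- (objective: alternative decomposition of the same cost).

-- ===== PORT A =====
-- is_prime: int(n**0.5) is ported as Nat.sqrt, exact for every 0 ≤ n ≤ 2^31 (here n = |num| with
-- |num| ≤ 2^31 on Dom; CPython's float n**0.5 truncates to isqrt(n) on that whole range).
def pv_is_prime (n : Int) : Bool :=
  if n ≤ 1 then false
  else (PySem.List.pyRange 2 ((Nat.sqrt n.toNat : Int) + 1) 1).all
    (fun i => !(PySem.Int.mod n i == 0))

def group_primes (numbers : List Int) : List (Int × List Int) :=
  (numbers.foldl (fun d num =>
      if pv_is_prime |num| then
        match PySem.Dict.get? d num with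
        | some l => PySem.Dict.insert d num (l ++ [num])
        | none   => PySem.Dict.insert d num [num]
      else d)
    PySem.Dict.empty).items

-- ===== PORT B =====
def group_primes_alt (numbers : List Int) : List (Int × List Int) :=
  let primes := numbers.filter (fun n => pv_is_prime |n|)
  let counts := primes.foldl (fun d x => d.insert x (d.getD x 0 + 1)) PySem.Dict.empty
  counts.items.map (fun kc => (kc.1, PySem.List.pyRepeat [kc.1] kc.2))

-- ===== PRECONDITION & SPEC =====
def Spec_group_primes (numbers : List Int) (out : List (Int × List Int)) : Prop := out = group_primes_alt numbers
instance (numbers : List Int) (out : List (Int × List Int)) : Decidable (Spec_group_primes numbers out) := by unfold Spec_group_primes; infer_instance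

-- ===== CLAIM (what is proved, stated in full; the proofs are below) =====
def Claim_equal_group_primes : Prop := ∀ (numbers : List Int), Dom_group_primes numbers → Spec_group_primes numbers (group_primes numbers)

-- ===== LEMMAS AND PROOFS =====

-- A's loop body on a prime is exactly dict.modify num [] (· ++ [num]).
theorem pv_step_eq_modify (d : PySem.Dict Int (List Int)) (x : Int) :
    (match PySem.Dict.get? d x with
     | some l => PySem.Dict.insert d x (l ++ [x])
     | none   => PySem.Dict.insert d x [x]) = d.modify x [] (· ++ [x]) := by
  cases h : PySem.Dict.get? d x with
  | none => simp [PySem.Dict.modify, PySem.Dict.getD_eq_get?_getD, h]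
  | some l => simp [PySem.Dict.modify, PySem.Dict.getD_eq_get?_getD, h]

-- ===== VERDICT (by name: the statement is the Claim_ definition above) =====
theorem group_primes_spec : Claim_equal_group_primes := by
  intro numbers _
  unfold Spec_group_primes group_primes group_primes_alt
  simp only [pv_step_eq_modify]
  rw [PySem.List.foldl_if_eq_foldl_filter]
  set primes := numbers.filter (fun n => pv_is_prime |n|) with hp
  set D := primes.foldl (fun d x => d.modify x [] (· ++ [x])) PySem.Dict.empty with hD
  have hkeys : D.keys = PySem.Set.ofList primes := by
    rw [hD, PySem.Dict.keys_foldl_modify]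
    simp [PySem.Set.update, PySem.Set.ofList_eq_foldl]
  have hnd : D.keys.Nodup := by rw [hkeys]; exact PySem.Set.nodup_ofList primes
  have hget : ∀ c : Int, D.getD c [] = List.replicate (primes.count c) c := by
    intro c
    have hmap : D = (primes.map (fun x => (x, x))).foldl
        (fun d p => d.modify p.1 [] (· ++ [p.2])) PySem.Dict.empty := by
      rw [hD, List.foldl_map]
    rw [hmap, PySem.Dict.getD_foldl_modify_append]
    simp [List.filter_map, Function.comp_def, List.filter_beq]
  rw [PySem.Dict.items_eq_map_keys D hnd []]
  rw [hkeys]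
  rw [PySem.Dict.foldl_insert_getD_add_one_eq_counter, PySem.Dict.items_counter]
  simp only [List.map_map, Function.comp_def, PySem.List.pyRepeat_singleton, Int.toNat_natCast]
  exact List.map_congr_left (fun k _ => by rw [hget k])
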